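-- pv_equiv track=rewrite | github.com/anupsharma555/openprose-psychiatry-research-agent | scripts/planner/prose_planner_runtime_input.py | ordered_matches
-- ===== SOURCE A (Python) =====
-- from typing import Any
--
-- def compact_ws(text: Any) -> str:
--     return " ".join(str(text or "").split()).strip()
--
-- def ordered_matches(text: str, phrases: list[str]) -> list[str]:
--     low = compact_ws(text).lower()
--     out = []
--     seen = set()
--     for phrase in phrases:
--         if phrase.lower() in low and phrase not in seen:
--             seen.add(phrase)
--             out.append(phrase)
--     return out
-- ===== SOURCE B (Python) =====
-- def _window_set(low, L):
--     # all substrings of low of length L (hashed once per distinct phrase length)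
--     return {low[i:i + L] for i in range(len(low) - L + 1)}
--
--
-- def ordered_matches(text, phrases):
--     low = " ".join(str(text or "").split()).strip().lower()
--     cache = {}
--     seen = set()
--     out = []
--     for phrase in phrases:
--         if phrase in seen:
--             continue
--         seen.add(phrase)
--         L = len(phrase)
--         if L not in cache:
--             cache[L] = _window_set(low, L)
--         if phrase.lower() in cache[L]:
--             out.append(phrase)
--     return out
-- ===== Notes on version B (the rewrite author's own statement) =====
-- stated objective: faster
-- what changed: Instead of running a substring scan of the whole text for every phrase, B builds - once per distinct phrase length L, cached in a dict - the hash set of all length-L windows of the normalized text and answers each phrase by a single hashed set lookup; phrases are skipped via a seen-set before testing rather than deduplicated after.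
import Mathlib
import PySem

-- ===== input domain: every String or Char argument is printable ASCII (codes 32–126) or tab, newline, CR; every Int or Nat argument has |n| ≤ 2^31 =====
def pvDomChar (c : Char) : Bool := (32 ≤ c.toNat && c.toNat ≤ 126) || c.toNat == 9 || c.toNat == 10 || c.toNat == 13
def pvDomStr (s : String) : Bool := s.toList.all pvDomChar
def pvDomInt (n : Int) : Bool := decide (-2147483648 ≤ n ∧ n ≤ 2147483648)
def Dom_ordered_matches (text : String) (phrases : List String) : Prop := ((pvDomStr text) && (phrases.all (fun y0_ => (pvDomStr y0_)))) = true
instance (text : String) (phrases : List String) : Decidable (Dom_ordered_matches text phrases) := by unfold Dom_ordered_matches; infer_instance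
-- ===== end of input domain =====

-- B replaces A's per-phrase `phrase.lower() in low` substring scans by a set of all
-- length-L windows of `low`, built once per distinct phrase length and then probed by
-- hashed membership lookup, one window-set build per distinct length ('faster' objective; same return value).

-- ===== PORT A =====
-- helper compact_ws: " ".join(str(text or "").split()).strip()
-- (`str(text or "")` on a str argument is the string itself — `text or ""` is text unless text is "", and str() is the identity)
def pvCompactWs (text : String) : String :=
  PySem.Str.strip (PySem.Str.join " " (PySem.Str.split₀ (if text == "" then "" else text)))

-- loop body: if phrase.lower() in low and phrase not in seen: seen.add(phrase); out.append(phrase)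
def pvStepA (low : String) (st : List String × PySem.Set String) (phrase : String) :
    List String × PySem.Set String :=
  if PySem.Str.isIn (PySem.Str.lower phrase) low && !(PySem.Set.contains st.2 phrase) then
    (st.1 ++ [phrase], PySem.Set.add st.2 phrase)
  else st

def ordered_matches (text : String) (phrases : List String) : List String :=
  (phrases.foldl (pvStepA (PySem.Str.lower (pvCompactWs text))) ([], PySem.Set.empty)).1

-- ===== PORT B =====
-- helper _window_set(low, L): {low[i:i+L] for i in range(len(low) - L + 1)}
def pvWindowSet (low : String) (L : Int) : PySem.Set String :=
  PySem.Set.ofList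
    ((PySem.List.pyRange 0 (PySem.Str.len low - L + 1)).map
      (fun i => PySem.Str.slice low (some i) (some (i + L))))

-- loop body of B (skip if seen; fill the cache for this length; hashed membership probe).
-- `cache[L]` in Source B is read right after the key was ensured present, so `getD` with a
-- dummy default is exact here.
def pvStepB (low : String)
    (st : PySem.Dict Int (PySem.Set String) × PySem.Set String × List String)
    (phrase : String) :
    PySem.Dict Int (PySem.Set String) × PySem.Set String × List String :=
  if PySem.Set.contains st.2.1 phrase then st
  else
    let seen := PySem.Set.add st.2.1 phrase
    let L : Int := PySem.Str.len phrase
    let cache := if st.1.contains L then st.1 else st.1.insert L (pvWindowSet low L)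
    if PySem.Set.contains (PySem.Dict.getD cache L PySem.Set.empty) (PySem.Str.lower phrase) then
      (cache, seen, st.2.2 ++ [phrase])
    else
      (cache, seen, st.2.2)

def ordered_matches_alt (text : String) (phrases : List String) : List String :=
  let low := PySem.Str.lower (PySem.Str.strip (PySem.Str.join " " (PySem.Str.split₀ (if text == "" then "" else text))))
  (phrases.foldl (pvStepB low) (PySem.Dict.empty, PySem.Set.empty, [])).2.2

-- ===== PRECONDITION & SPEC =====
def Spec_ordered_matches (text : String) (phrases : List String) (out : List String) : Prop := out = ordered_matches_alt text phrases
instance (text : String) (phrases : List String) (out : List String) : Decidable (Spec_ordered_matches text phrases out) := by unfold Spec_ordered_matches; infer_instance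

-- ===== CLAIM (what is proved, stated in full; the proofs are below) =====
def Claim_equal_ordered_matches : Prop := ∀ (text : String) (phrases : List String), Dom_ordered_matches text phrases → Spec_ordered_matches text phrases (ordered_matches text phrases)

-- ===== LEMMAS AND PROOFS =====

-- membership in the window set of sub's own length is exactly `sub in low`
lemma pv_window_isIn (low sub : String) :
    sub ∈ pvWindowSet low ((sub.toList.length : Nat) : Int) ↔ PySem.Str.isIn sub low = true := by
  rw [pvWindowSet, PySem.Set.mem_ofList, List.mem_map, PySem.Str.isIn_iff_infix]
  constructor
  · rintro ⟨i, hi, hslice⟩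
    rw [PySem.List.mem_pyRange_one] at hi
    obtain ⟨h0, _⟩ := hi
    have hj : i = ((i.toNat : Nat) : Int) := by omega
    have hlist : (PySem.Str.slice low (some i) (some (i + (sub.toList.length : Int)))).toList
        = (low.toList.drop i.toNat).take sub.toList.length := by
      rw [PySem.Str.toList_slice, PySem.Chars.slice_eq_listSlice, hj]
      exact_mod_cast PySem.List.slice_natCast_add low.toList i.toNat sub.toList.length
    rw [hslice] at hlist
    have hpre : sub.toList <+: low.toList.drop i.toNat := hlist ▸ List.take_prefix _ _
    rw [← PySem.Chars.isIn_iff_infix, ← PySem.Chars.exists_prefix_drop_iff_isIn]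
    exact ⟨i.toNat, hpre⟩
  · intro hinf
    have hex : ∃ j, sub.toList <+: low.toList.drop j := by
      rw [PySem.Chars.exists_prefix_drop_iff_isIn, PySem.Chars.isIn_iff_infix]
      exact hinf
    obtain ⟨j, hpre⟩ := hex
    set n := low.toList.length with hn
    set L := sub.toList.length with hL
    -- normalise the drop position to j' ≤ n (drop past the end is [])
    have hpre' : sub.toList <+: low.toList.drop (min j n) := by
      rcases le_or_gt j n with h | h
      · simpa [min_eq_left h] using hpre
      · have hnil : low.toList.drop j = [] := List.drop_eq_nil_of_le (by omega)
        have hsub : sub.toList = [] := List.prefix_nil.mp (hnil ▸ hpre)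
        simp [hsub]
    set j' := min j n with hj'
    have hjn : j' ≤ n := min_le_right _ _
    have hLle : L ≤ n - j' := by
      have h1 := hpre'.length_le
      rw [List.length_drop] at h1
      exact h1
    refine ⟨(j' : Int), ?_, ?_⟩
    · rw [PySem.List.mem_pyRange_one]
      refine ⟨Int.natCast_nonneg j', ?_⟩
      have hjLn : j' + L ≤ n := by omega
      rw [PySem.Str.len_eq]
      omega
    · apply String.toList_inj.mp
      rw [PySem.Str.toList_slice, PySem.Chars.slice_eq_listSlice,
        PySem.List.slice_natCast_add low.toList j' L]
      exact (List.prefix_iff_eq_take.mp hpre').symm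

-- the loop equivalence, generalized over the two loop states
lemma pv_fold_eq (low : String) (phrases : List String)
    (outA outB : List String) (seenA seenB : PySem.Set String)
    (cache : PySem.Dict Int (PySem.Set String))
    (hout : outA = outB)
    (hseen : ∀ q, q ∈ seenA ↔ (q ∈ seenB ∧ PySem.Str.isIn (PySem.Str.lower q) low = true))
    (hcache : ∀ L S, cache.get? L = some S → S = pvWindowSet low L) :
    (phrases.foldl (pvStepA low) (outA, seenA)).1
      = (phrases.foldl (pvStepB low) (cache, seenB, outB)).2.2 := by
  induction phrases generalizing outA outB seenA seenB cache with
  | nil => simpa using hout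
  | cons p ps ih =>
    simp only [List.foldl_cons]
    by_cases hbm : p ∈ seenB
    · -- B skips; A's condition is false as well (a seen phrase either matched before or never matches)
      have hB : pvStepB low (cache, seenB, outB) p = (cache, seenB, outB) := by
        unfold pvStepB
        rw [if_pos (by simpa [PySem.Set.contains_iff] using hbm)]
      have hA : pvStepA low (outA, seenA) p = (outA, seenA) := by
        unfold pvStepA
        cases hMv : PySem.Str.isIn (PySem.Str.lower p) low with
        | false => simp
        | true =>
          have hpA : p ∈ seenA := (hseen p).mpr ⟨hbm, hMv⟩
          simp [hpA]
      rw [hA, hB]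
      exact ih outA outB seenA seenB cache hout hseen hcache
    · have hbf : PySem.Set.contains seenB p = false := by
        simp [hbm]
      have haf : p ∉ seenA := fun h => hbm ((hseen p).mp h).1
      set L : Int := PySem.Str.len p with hLdef
      set cache' := if cache.contains L then cache else cache.insert L (pvWindowSet low L)
        with hc'
      -- after the fill, every cache entry is still the window set of its key
      have hcache' : ∀ K S, cache'.get? K = some S → S = pvWindowSet low K := by
        intro K S hKS
        rw [hc'] at hKS
        by_cases hcon : cache.contains L = true
        · rw [if_pos hcon] at hKS; exact hcache K S hKS
        · rw [if_neg hcon] at hKS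
          by_cases hK : K = L
          · subst hK
            rw [PySem.Dict.get?_insert_self] at hKS
            exact (Option.some_inj.mp hKS).symm
          · rw [PySem.Dict.get?_insert_of_ne _ _ hK] at hKS
            exact hcache K S hKS
      -- the lookup after the fill yields exactly the window set at L
      have hlook : PySem.Dict.getD cache' L PySem.Set.empty = pvWindowSet low L := by
        rw [hc']
        by_cases hcon : cache.contains L = true
        · rw [if_pos hcon]
          have hsome : (cache.get? L).isSome := by
            rw [← PySem.Dict.contains_eq_isSome_get?]; exact hcon
          obtain ⟨S, hS⟩ := Option.isSome_iff_exists.mp hsome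
          rw [PySem.Dict.getD_eq_get?_getD, hS, Option.getD_some]
          exact hcache L S hS
        · rw [if_neg hcon, PySem.Dict.getD_eq_get?_getD, PySem.Dict.get?_insert_self,
            Option.getD_some]
      -- the hashed probe equals A's substring test
      have hhit : PySem.Set.contains (PySem.Dict.getD cache' L PySem.Set.empty)
          (PySem.Str.lower p) = PySem.Str.isIn (PySem.Str.lower p) low := by
        have hLcast : L = (((PySem.Str.lower p).toList.length : Nat) : Int) := by
          rw [hLdef, PySem.Str.len_eq, PySem.Str.toList_lower, PySem.Chars.lower,
            List.length_map]
        rw [Bool.eq_iff_iff, PySem.Set.contains_iff, hlook, hLcast, pv_window_isIn]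
      have hstepB : pvStepB low (cache, seenB, outB) p
          = (cache', PySem.Set.add seenB p,
              if PySem.Str.isIn (PySem.Str.lower p) low then outB ++ [p] else outB) := by
        unfold pvStepB
        rw [if_neg (by simpa [PySem.Set.contains_iff] using hbm)]
        simp only [← hLdef, ← hc', hhit]
        cases PySem.Str.isIn (PySem.Str.lower p) low <;> simp
      have hstepA : pvStepA low (outA, seenA) p
          = (if PySem.Str.isIn (PySem.Str.lower p) low then
              (outA ++ [p], PySem.Set.add seenA p) else (outA, seenA)) := by
        unfold pvStepA
        cases hMv : PySem.Str.isIn (PySem.Str.lower p) low with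
        | false => simp
        | true => simp [haf]
      rw [hstepA, hstepB]
      cases hMv : PySem.Str.isIn (PySem.Str.lower p) low with
      | false =>
        have hMv' : PySem.Chars.isIn (PySem.Chars.lower p.toList) low.toList = false := by
          simpa using hMv
        rw [if_neg (by simp), if_neg (by simp)]
        apply ih
        · exact hout
        · intro q
          by_cases hq : q = p
          · subst hq; simp [PySem.Set.mem_add, haf, hMv']
          · simp [PySem.Set.mem_add, hq, hseen q]
        · exact hcache'
      | true =>
        have hMv' : PySem.Chars.isIn (PySem.Chars.lower p.toList) low.toList = true := by
          simpa using hMv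
        rw [if_pos (by simp), if_pos (by simp)]
        apply ih
        · rw [hout]
        · intro q
          by_cases hq : q = p
          · subst hq; simp [PySem.Set.mem_add, hMv']
          · simp [PySem.Set.mem_add, hq, hseen q]
        · exact hcache'
-- ===== VERDICT (by name: the statement is the Claim_ definition above) =====
theorem ordered_matches_spec : Claim_equal_ordered_matches := by
  intro text phrases _
  unfold Spec_ordered_matches ordered_matches ordered_matches_alt pvCompactWs
  apply pv_fold_eq
  · rfl
  · intro q; simp [PySem.Set.empty]
  · intro L S h; rw [PySem.Dict.get?_empty] at h; cases h
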